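-- pv_equiv track=rewrite | github.com/soken2022/GRCh38.p14 | Su_Human2.py | segments_to_composition
-- ===== SOURCE A (Python) =====
-- def segments_to_composition(plus_element_inf_4,comp_element_inf_4):
--     Ap = [k.count('a') for k in plus_element_inf_4]
--     Tp = [k.count('t') for k in plus_element_inf_4]
--     Cp = [k.count('c') for k in plus_element_inf_4]
--     Gp = [k.count('g') for k in plus_element_inf_4]
--     P_group = [Ap,Tp,Cp,Gp]
--     Ac = [h.count('a') for h in comp_element_inf_4]
--     Tc = [h.count('t') for h in comp_element_inf_4]
--     Cc = [h.count('c') for h in comp_element_inf_4]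
--     Gc = [h.count('g') for h in comp_element_inf_4]
--     C_group = [Ac,Tc,Cc,Gc]
--     return P_group,C_group
-- ===== SOURCE B (Python) =====
-- def segments_to_composition(plus_element_inf_4, comp_element_inf_4):
--     def group(segments):
--         Ax, Tx, Cx, Gx = [], [], [], []
--         for seg in segments:
--             a = t = c = g = 0
--             for ch in seg:
--                 if ch == 'a':
--                     a += 1
--                 elif ch == 't':
--                     t += 1
--                 elif ch == 'c':
--                     c += 1
--                 elif ch == 'g':
--                     g += 1
--             Ax.append(a)
--             Tx.append(t)
--             Cx.append(c)
--             Gx.append(g)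
--         return [Ax, Tx, Cx, Gx]
--     return group(plus_element_inf_4), group(comp_element_inf_4)
-- ===== Notes on version B (the rewrite author's own statement) =====
-- stated objective: alternative
-- what changed: Each segment is scanned once, tallying all four nucleotides in a single character loop that feeds four accumulator lists, instead of four separate .count passes per list.
import Mathlib
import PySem

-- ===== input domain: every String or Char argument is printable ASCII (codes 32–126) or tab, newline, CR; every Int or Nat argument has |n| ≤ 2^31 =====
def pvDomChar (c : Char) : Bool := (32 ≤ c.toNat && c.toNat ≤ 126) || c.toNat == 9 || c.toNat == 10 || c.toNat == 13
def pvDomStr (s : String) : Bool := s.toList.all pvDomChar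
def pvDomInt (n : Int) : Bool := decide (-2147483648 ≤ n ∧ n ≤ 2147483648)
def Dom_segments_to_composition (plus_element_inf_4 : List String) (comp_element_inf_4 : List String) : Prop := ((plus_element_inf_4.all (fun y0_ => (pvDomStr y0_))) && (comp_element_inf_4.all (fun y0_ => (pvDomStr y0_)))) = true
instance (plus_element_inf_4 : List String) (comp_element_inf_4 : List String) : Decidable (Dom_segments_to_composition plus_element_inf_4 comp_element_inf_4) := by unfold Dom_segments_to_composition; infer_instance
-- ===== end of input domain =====

-- B scans each segment once, tallying all four nucleotides in one character loop instead of A's four separate count passes per list (alternative decomposition, same cost).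


-- ===== PORT A =====
def segments_to_composition (plus_element_inf_4 : List String) (comp_element_inf_4 : List String) : List (List Int) × List (List Int) :=
  let Ap := plus_element_inf_4.map (fun k => (PySem.Str.count k "a" : Int))
  let Tp := plus_element_inf_4.map (fun k => (PySem.Str.count k "t" : Int))
  let Cp := plus_element_inf_4.map (fun k => (PySem.Str.count k "c" : Int))
  let Gp := plus_element_inf_4.map (fun k => (PySem.Str.count k "g" : Int))
  let P_group := [Ap, Tp, Cp, Gp]
  let Ac := comp_element_inf_4.map (fun h => (PySem.Str.count h "a" : Int))
  let Tc := comp_element_inf_4.map (fun h => (PySem.Str.count h "t" : Int))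
  let Cc := comp_element_inf_4.map (fun h => (PySem.Str.count h "c" : Int))
  let Gc := comp_element_inf_4.map (fun h => (PySem.Str.count h "g" : Int))
  let C_group := [Ac, Tc, Cc, Gc]
  (P_group, C_group)

-- ===== PORT B =====
-- single scan over the segment's characters, tallying all four counts at once
def pvStep (acc : Int × Int × Int × Int) (ch : Char) : Int × Int × Int × Int :=
  if ch == 'a' then (acc.1 + 1, acc.2.1, acc.2.2.1, acc.2.2.2)
  else if ch == 't' then (acc.1, acc.2.1 + 1, acc.2.2.1, acc.2.2.2)
  else if ch == 'c' then (acc.1, acc.2.1, acc.2.2.1 + 1, acc.2.2.2)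
  else if ch == 'g' then (acc.1, acc.2.1, acc.2.2.1, acc.2.2.2 + 1)
  else acc

def pvTally (s : String) : Int × Int × Int × Int :=
  s.toList.foldl pvStep (0, 0, 0, 0)

-- one loop over the segments, appending each tally to the four accumulator lists
def pvGroup (segments : List String) : List (List Int) :=
  let r := segments.foldl
    (fun (acc : List Int × List Int × List Int × List Int) s =>
      let t := pvTally s
      (acc.1 ++ [t.1], acc.2.1 ++ [t.2.1], acc.2.2.1 ++ [t.2.2.1], acc.2.2.2 ++ [t.2.2.2]))
    ([], [], [], [])
  [r.1, r.2.1, r.2.2.1, r.2.2.2]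

def segments_to_composition_alt (plus_element_inf_4 : List String) (comp_element_inf_4 : List String) : List (List Int) × List (List Int) :=
  (pvGroup plus_element_inf_4, pvGroup comp_element_inf_4)

-- ===== PRECONDITION & SPEC =====
def Spec_segments_to_composition (plus_element_inf_4 : List String) (comp_element_inf_4 : List String) (out : List (List Int) × List (List Int)) : Prop := out = segments_to_composition_alt plus_element_inf_4 comp_element_inf_4
instance (plus_element_inf_4 : List String) (comp_element_inf_4 : List String) (out : List (List Int) × List (List Int)) : Decidable (Spec_segments_to_composition plus_element_inf_4 comp_element_inf_4 out) := by unfold Spec_segments_to_composition; infer_instance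

-- ===== CLAIM (what is proved, stated in full; the proofs are below) =====
def Claim_equal_segments_to_composition : Prop := ∀ (plus_element_inf_4 : List String) (comp_element_inf_4 : List String), Dom_segments_to_composition plus_element_inf_4 comp_element_inf_4 → Spec_segments_to_composition plus_element_inf_4 comp_element_inf_4 (segments_to_composition plus_element_inf_4 comp_element_inf_4)

-- ===== LEMMAS AND PROOFS =====

-- Python's s.count('x') for a single character equals the character count of the list
-- the fuel-indexed scanner of PySem.Chars.count, specialised to a one-character needle
theorem chars_count_go_singleton (c : Char) (l : List Char) : ∀ (acc : Nat),
    PySem.Chars.count.go [c] l.length l acc = acc + l.count c := by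
  induction l with
  | nil => intro acc; simp [PySem.Chars.count.go]
  | cons h t ih =>
    intro acc
    rw [List.length_cons]
    by_cases hc : c = h
    · subst hc
      simp [PySem.Chars.count.go, List.isPrefixOf, ih]
      omega
    · simp [PySem.Chars.count.go, List.isPrefixOf, Ne.symm hc, ih, hc]

theorem chars_count_singleton (cs : List Char) (c : Char) :
    PySem.Chars.count cs [c] = cs.count c := by
  simp [PySem.Chars.count, chars_count_go_singleton]

-- one step of the tally adds the indicator of each nucleotide
theorem pvStep_eq (a t c g : Int) (ch : Char) :
    pvStep (a, t, c, g) ch =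
      (a + if ch = 'a' then 1 else 0, t + if ch = 't' then 1 else 0,
       c + if ch = 'c' then 1 else 0, g + if ch = 'g' then 1 else 0) := by
  by_cases h1 : ch = 'a'
  · subst h1; simp [pvStep]
  · by_cases h2 : ch = 't'
    · subst h2; simp [pvStep]
    · by_cases h3 : ch = 'c'
      · subst h3; simp [pvStep]
      · by_cases h4 : ch = 'g'
        · subst h4; simp [pvStep]
        · simp [pvStep, h1, h2, h3, h4]

-- the single-scan tally computes the four character counts
theorem pvTally_eq (s : String) :
    pvTally s = ((s.toList.count 'a' : Int), (s.toList.count 't' : Int),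
                 (s.toList.count 'c' : Int), (s.toList.count 'g' : Int)) := by
  unfold pvTally
  suffices h : ∀ (l : List Char) (a t c g : Int),
      l.foldl pvStep (a, t, c, g) =
      (a + l.count 'a', t + l.count 't', c + l.count 'c', g + l.count 'g') by
    rw [h]; simp
  intro l
  induction l with
  | nil => intro a t c g; simp
  | cons ch rest ih =>
    intro a t c g
    rw [List.foldl_cons, pvStep_eq, ih]
    simp only [Prod.mk.injEq, List.count_cons, beq_iff_eq]
    refine ⟨?_, ?_, ?_, ?_⟩ <;> split_ifs <;> omega

-- the segment loop's accumulators are the four map-columns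
theorem pvGroup_eq (segments : List String) :
    pvGroup segments =
      [segments.map (fun k => ((k.toList.count 'a' : Nat) : Int)),
       segments.map (fun k => ((k.toList.count 't' : Nat) : Int)),
       segments.map (fun k => ((k.toList.count 'c' : Nat) : Int)),
       segments.map (fun k => ((k.toList.count 'g' : Nat) : Int))] := by
  unfold pvGroup
  suffices h : ∀ (segs : List String) (A T C G : List Int),
      segs.foldl (fun (acc : List Int × List Int × List Int × List Int) s =>
        let t := pvTally s
        (acc.1 ++ [t.1], acc.2.1 ++ [t.2.1], acc.2.2.1 ++ [t.2.2.1], acc.2.2.2 ++ [t.2.2.2]))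
        (A, T, C, G) =
      (A ++ segs.map (fun k => ((k.toList.count 'a' : Nat) : Int)),
       T ++ segs.map (fun k => ((k.toList.count 't' : Nat) : Int)),
       C ++ segs.map (fun k => ((k.toList.count 'c' : Nat) : Int)),
       G ++ segs.map (fun k => ((k.toList.count 'g' : Nat) : Int))) by
    simp [h]
  intro segs
  induction segs with
  | nil => intro A T C G; simp
  | cons s rest ih =>
    intro A T C G
    rw [List.foldl_cons]
    show List.foldl _ (A ++ [(pvTally s).1], T ++ [(pvTally s).2.1],
        C ++ [(pvTally s).2.2.1], G ++ [(pvTally s).2.2.2]) rest = _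
    rw [ih]
    simp [pvTally_eq]

-- ===== VERDICT (by name: the statement is the Claim_ definition above) =====
theorem segments_to_composition_spec : Claim_equal_segments_to_composition := by
  intro p c _
  unfold Spec_segments_to_composition segments_to_composition segments_to_composition_alt
  simp only [pvGroup_eq, PySem.Str.count_eq,
    show ("a" : String).toList = ['a'] from rfl, show ("t" : String).toList = ['t'] from rfl,
    show ("c" : String).toList = ['c'] from rfl, show ("g" : String).toList = ['g'] from rfl,
    chars_count_singleton]
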